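-- pv_equiv track=rewrite | github.com/123222222/Aeon_Web-news-internal | files/backend/main.py | normalize_keyword
-- ===== SOURCE A (Python) =====
-- from typing import List, Optional
--
-- def normalize_keyword(raw: Optional[str]) -> str:
--     if not raw:
--         return ""
--     cleaned = raw.strip()
--     while cleaned.startswith("#"):
--         cleaned = cleaned[1:].strip()
--     cleaned = " ".join(cleaned.split())
--     return cleaned
-- ===== SOURCE B (Python) =====
-- def normalize_keyword(raw):
--     if not raw:
--         return ""
--     # one forward pass: skip every leading hash or whitespace character
--     i = 0
--     n = len(raw)
--     while i < n and (raw[i] == '#' or raw[i].isspace()):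
--         i += 1
--     return " ".join(raw[i:].split())
-- ===== Notes on version B (the rewrite author's own statement) =====
-- stated objective: simpler
-- what changed: Replaces the repeated startswith/slice/strip loop by a single forward scan that skips leading hash and whitespace characters, then one join(split).
import Mathlib
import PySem

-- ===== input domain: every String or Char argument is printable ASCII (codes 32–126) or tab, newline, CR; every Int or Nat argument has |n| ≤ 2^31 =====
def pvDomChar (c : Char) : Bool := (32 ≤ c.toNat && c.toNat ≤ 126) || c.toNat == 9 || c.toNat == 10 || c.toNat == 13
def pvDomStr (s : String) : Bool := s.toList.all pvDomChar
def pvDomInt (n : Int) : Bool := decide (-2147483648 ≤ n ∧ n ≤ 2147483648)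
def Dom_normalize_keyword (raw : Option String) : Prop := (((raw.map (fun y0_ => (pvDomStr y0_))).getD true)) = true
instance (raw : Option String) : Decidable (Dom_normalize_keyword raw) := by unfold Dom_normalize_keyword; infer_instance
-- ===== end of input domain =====

-- B replaces A's repeated startswith/slice/strip loop by a single forward scan over the
-- characters that skips leading hash marks and whitespace, then one join(split) — simpler, same result.


-- ===== PORT A =====
-- length bound used only for termination of the while-loop below
theorem pvStripLenLe (s : List Char) : (PySem.Chars.strip s).length ≤ s.length := by
  have h1 : (PySem.Chars.lstrip s).length ≤ s.length := List.length_dropWhile_le _ _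
  have h2 : (PySem.Chars.rstrip (PySem.Chars.lstrip s)).length ≤ (PySem.Chars.lstrip s).length := by
    simpa [PySem.Chars.rstrip] using List.length_dropWhile_le PySem.Chars.isspace (PySem.Chars.lstrip s).reverse
  exact le_trans h2 h1

-- 'while cleaned.startswith("#"): cleaned = cleaned[1:].strip()'
def hashLoopA (cleaned : List Char) : List Char :=
  if PySem.Chars.startswith cleaned ['#'] then
    hashLoopA (PySem.Chars.strip (cleaned.drop 1))
  else cleaned
termination_by cleaned.length
decreasing_by
  have hne : cleaned ≠ [] := by
    intro h; subst h; simp [PySem.Chars.startswith] at *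
  calc (PySem.Chars.strip (cleaned.drop 1)).length
      ≤ (cleaned.drop 1).length := pvStripLenLe _
    _ < cleaned.length := by
        cases cleaned with
        | nil => exact absurd rfl hne
        | cons c t => simp

def normalize_keyword (raw : Option String) : String :=
  match raw with
  | none => ""
  | some s =>
    if s = "" then ""                                   -- 'if not raw: return ""'
    else
      let cleaned := PySem.Chars.strip s.toList         -- raw.strip()
      let cleaned := hashLoopA cleaned                  -- the while loop
      String.ofList (PySem.Chars.join [' '] (PySem.Chars.split₀ cleaned))  -- " ".join(cleaned.split())

-- ===== PORT B =====
def pvHashOrSpace (c : Char) : Bool := c == '#' || PySem.Chars.isspace c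

def normalize_keyword_alt (raw : Option String) : String :=
  match raw with
  | none => ""
  | some s =>
    if s = "" then ""
    else
      -- one forward scan skipping leading hash/whitespace (the index while-loop), then raw[i:]
      let rest := s.toList.dropWhile pvHashOrSpace
      String.ofList (PySem.Chars.join [' '] (PySem.Chars.split₀ rest))

-- ===== PRECONDITION & SPEC =====
def Spec_normalize_keyword (raw : Option String) (out : String) : Prop := out = normalize_keyword_alt raw
instance (raw : Option String) (out : String) : Decidable (Spec_normalize_keyword raw out) := by unfold Spec_normalize_keyword; infer_instance

-- ===== CLAIM (what is proved, stated in full; the proofs are below) =====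
def Claim_equal_normalize_keyword : Prop := ∀ (raw : Option String), Dom_normalize_keyword raw → Spec_normalize_keyword raw (normalize_keyword raw)

-- ===== LEMMAS AND PROOFS =====

-- split₀.go ignores an all-whitespace suffix
theorem go_space_tail (w : List Char) (hw : ∀ c ∈ w, PySem.Chars.isspace c = true)
    (cur : List Char) (acc : List (List Char)) :
    PySem.Chars.split₀.go w cur acc = PySem.Chars.split₀.go [] cur acc := by
  induction w generalizing cur acc with
  | nil => rfl
  | cons c w ih =>
    have hc := hw c (by simp)
    by_cases hcur : cur = []
    · subst hcur
      simp [PySem.Chars.split₀.go, hc, ih (fun x hx => hw x (by simp [hx]))]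
    · simp [PySem.Chars.split₀.go, hc, hcur, ih (fun x hx => hw x (by simp [hx]))]

theorem go_append_space (u w : List Char) (hw : ∀ c ∈ w, PySem.Chars.isspace c = true)
    (cur : List Char) (acc : List (List Char)) :
    PySem.Chars.split₀.go (u ++ w) cur acc = PySem.Chars.split₀.go u cur acc := by
  induction u generalizing cur acc with
  | nil => simpa using go_space_tail w hw cur acc
  | cons c u ih =>
    by_cases hc : PySem.Chars.isspace c = true
    · by_cases hcur : cur = [] <;> simp [PySem.Chars.split₀.go, hc, hcur, ih]
    · simp [PySem.Chars.split₀.go, hc, ih]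

theorem split₀_rstrip (u : List Char) :
    PySem.Chars.split₀ (PySem.Chars.rstrip u) = PySem.Chars.split₀ u := by
  have hdecomp : u = PySem.Chars.rstrip u ++ (u.reverse.takeWhile PySem.Chars.isspace).reverse := by
    have h : u.reverse.takeWhile PySem.Chars.isspace ++ u.reverse.dropWhile PySem.Chars.isspace = u.reverse :=
      List.takeWhile_append_dropWhile
    conv_lhs => rw [← u.reverse_reverse, ← h]
    rw [List.reverse_append]
    rfl
  have hw : ∀ c ∈ (u.reverse.takeWhile PySem.Chars.isspace).reverse, PySem.Chars.isspace c = true := by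
    intro c hc
    exact List.mem_takeWhile_imp (by simpa using hc)
  conv_rhs => rw [hdecomp]
  unfold PySem.Chars.split₀
  exact (go_append_space _ _ hw _ _).symm

theorem rstrip_cons (c : Char) (t : List Char) :
    PySem.Chars.rstrip (c :: t) =
      if PySem.Chars.rstrip t = [] then (if PySem.Chars.isspace c then [] else [c])
      else c :: PySem.Chars.rstrip t := by
  have h : (c :: t).reverse = t.reverse ++ [c] := by simp
  by_cases h0 : t.reverse.dropWhile PySem.Chars.isspace = []
  · by_cases hc : PySem.Chars.isspace c = true <;>
      simp [PySem.Chars.rstrip, h, List.dropWhile_append, h0, hc, List.dropWhile]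
  · simp [PySem.Chars.rstrip, h, List.dropWhile_append, h0]

theorem rstrip_cons_not_space (c : Char) (t : List Char) (hc : PySem.Chars.isspace c = false) :
    PySem.Chars.rstrip (c :: t) = c :: PySem.Chars.rstrip t := by
  rw [rstrip_cons]
  by_cases h0 : PySem.Chars.rstrip t = [] <;> simp [h0, hc]

-- split₀ ∘ dropWhile is unchanged by rstrip
theorem split₀_dropWhile_rstrip (t : List Char) :
    PySem.Chars.split₀ ((PySem.Chars.rstrip t).dropWhile pvHashOrSpace) =
    PySem.Chars.split₀ (t.dropWhile pvHashOrSpace) := by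
  induction t with
  | nil => rfl
  | cons c t ih =>
    by_cases hp : pvHashOrSpace c = true
    · rw [List.dropWhile_cons_of_pos hp]
      by_cases hc : PySem.Chars.isspace c = true
      · rw [rstrip_cons]
        by_cases h0 : PySem.Chars.rstrip t = []
        · have hall : ∀ x ∈ t, PySem.Chars.isspace x = true := by
            intro x hx
            have : t.reverse.dropWhile PySem.Chars.isspace = [] := by
              simpa [PySem.Chars.rstrip] using congrArg List.reverse h0
            have := (List.dropWhile_eq_nil_iff).mp this
            exact this x (by simpa using hx)
          have hall' : t.dropWhile pvHashOrSpace = [] := by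
            rw [List.dropWhile_eq_nil_iff]
            intro x hx; simp [pvHashOrSpace, hall x hx]
          simp [h0, hc, hall']
        · rw [if_neg h0, List.dropWhile_cons_of_pos hp]
          exact ih
      · have hc' : PySem.Chars.isspace c = false := by simpa using hc
        rw [rstrip_cons_not_space c t hc', List.dropWhile_cons_of_pos hp]
        exact ih
    · have hcc : ¬c = '#' ∧ PySem.Chars.isspace c = false := by
        simpa [pvHashOrSpace] using hp
      rw [List.dropWhile_cons_of_neg hp]
      have : (PySem.Chars.rstrip (c :: t)).dropWhile pvHashOrSpace = PySem.Chars.rstrip (c :: t) := by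
        rw [rstrip_cons_not_space c t hcc.2]
        exact List.dropWhile_cons_of_neg hp
      rw [this]
      exact split₀_rstrip (c :: t)

theorem lstrip_eq_self_of_head (c : Char) (t : List Char) (hc : PySem.Chars.isspace c = false) :
    PySem.Chars.lstrip (c :: t) = c :: t := by
  simp [PySem.Chars.lstrip, hc]

theorem hashLoopA_nostart (cleaned : List Char) (h : PySem.Chars.startswith cleaned ['#'] = false) :
    hashLoopA cleaned = cleaned := by
  rw [hashLoopA, if_neg (by simp [h])]

-- the main invariant: A's strip/hash loop and B's single dropWhile agree after split₀
theorem main_lemma : ∀ n (s : List Char), s.length ≤ n →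
    PySem.Chars.split₀ (hashLoopA (PySem.Chars.strip s)) =
    PySem.Chars.split₀ (s.dropWhile pvHashOrSpace) := by
  intro n
  induction n with
  | zero =>
    intro s hs
    have : s = [] := List.eq_nil_of_length_eq_zero (Nat.le_zero.mp hs)
    subst this
    rw [hashLoopA_nostart _ (by simp [PySem.Chars.startswith, PySem.Chars.strip, PySem.Chars.lstrip, PySem.Chars.rstrip])]
    rfl
  | succ n ih =>
    intro s hs
    cases s with
    | nil =>
      rw [hashLoopA_nostart _ (by simp [PySem.Chars.startswith, PySem.Chars.strip, PySem.Chars.lstrip, PySem.Chars.rstrip])]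
      rfl
    | cons c t =>
      have ht : t.length ≤ n := by simpa using hs
      by_cases hc : PySem.Chars.isspace c = true
      · have h1 : PySem.Chars.strip (c :: t) = PySem.Chars.strip t := by
          simp [PySem.Chars.strip, PySem.Chars.lstrip, List.dropWhile_cons_of_pos hc]
        have h2 : (c :: t).dropWhile pvHashOrSpace = t.dropWhile pvHashOrSpace :=
          List.dropWhile_cons_of_pos (by simp [pvHashOrSpace, hc])
        rw [h1, h2]; exact ih t ht
      · have hc' : PySem.Chars.isspace c = false := by simpa using hc
        have hstrip : PySem.Chars.strip (c :: t) = PySem.Chars.rstrip (c :: t) := by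
          simp [PySem.Chars.strip, lstrip_eq_self_of_head c t hc']
        by_cases hh : c = '#'
        · subst hh
          rw [hstrip, rstrip_cons_not_space _ t hc']
          rw [hashLoopA, if_pos (by simp [PySem.Chars.startswith, List.isPrefixOf])]
          have hr : (PySem.Chars.rstrip t).length ≤ n :=
            le_trans (by simpa [PySem.Chars.rstrip] using
              List.length_dropWhile_le PySem.Chars.isspace t.reverse) ht
          have := ih (PySem.Chars.rstrip t) hr
          simp only [List.drop_succ_cons, List.drop_zero] at *
          rw [this, split₀_dropWhile_rstrip t,
            List.dropWhile_cons_of_pos (by simp [pvHashOrSpace])]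
        · have hp : pvHashOrSpace c = false := by
            simp [pvHashOrSpace, hc', hh]
          rw [hstrip, rstrip_cons_not_space c t hc',
            hashLoopA_nostart _ (by
              simp [PySem.Chars.startswith, List.isPrefixOf]
              intro h; exact absurd h.symm hh),
            List.dropWhile_cons_of_neg (by simp [hp])]
          have : PySem.Chars.split₀ (PySem.Chars.rstrip (c :: t)) = PySem.Chars.split₀ (c :: t) :=
            split₀_rstrip (c :: t)
          rw [rstrip_cons_not_space c t hc'] at this
          exact this

-- ===== VERDICT (by name: the statement is the Claim_ definition above) =====
theorem normalize_keyword_spec : Claim_equal_normalize_keyword := by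
  intro raw _
  unfold Spec_normalize_keyword normalize_keyword normalize_keyword_alt
  match raw with
  | none => rfl
  | some s =>
    by_cases hs : s = ""
    · simp [hs]
    · simp only [hs, if_false]
      rw [main_lemma s.toList.length s.toList le_rfl]
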